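-- pv_equiv track=rewrite | github.com/DrLu-2017/ai-job | msca_scraper.py | classify_position
-- ===== SOURCE A (Python) =====
-- def classify_position(title, content):
--     """Classify the type of position"""
--     title_content = (title + ' ' + content).lower()
--     if any(x in title_content for x in ['phd', 'doctoral', 'doctorate', 'thesis']):
--         return 'PhD Position'
--     if any(x in title_content for x in ['postdoc', 'post-doctoral', 'postdoctoral']):
--         return 'Postdoctoral Position'
--     if any(x in title_content for x in ['professor', 'lecturer', 'faculty', 'teaching']):
--         return 'Academic Position'
--     if any(x in title_content for x in ['researcher', 'scientist', 'research fellow']):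
--         return 'Research Position'
--     if any(x in title_content for x in ['engineer', 'technician', 'specialist']):
--         return 'Technical Position'
--     return 'Other Position'
-- ===== SOURCE B (Python) =====
-- # B: flat keyword->rank map + min-reduction over all matches, instead of A's
-- # sequential early-return keyword-group cascade. Correct because A returns the
-- # first (= lowest-numbered) group containing a keyword present in the text,
-- # which is exactly the minimum rank over all keywords present.
-- KEYWORD_RANK = {
--     'phd': 0, 'doctoral': 0, 'doctorate': 0, 'thesis': 0,
--     'postdoc': 1, 'post-doctoral': 1, 'postdoctoral': 1,
--     'professor': 2, 'lecturer': 2, 'faculty': 2, 'teaching': 2,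
--     'researcher': 3, 'scientist': 3, 'research fellow': 3,
--     'engineer': 4, 'technician': 4, 'specialist': 4,
-- }
-- LABELS = ['PhD Position', 'Postdoctoral Position', 'Academic Position',
--           'Research Position', 'Technical Position', 'Other Position']
--
-- def classify_position(title, content):
--     """Classify the type of position"""
--     text = (title + ' ' + content).lower()
--     best = 5
--     for kw, rank in KEYWORD_RANK.items():
--         if rank < best and kw in text:
--             best = rank
--     return LABELS[best]
-- ===== Notes on version B (the rewrite author's own statement) =====
-- stated objective: alternative
-- what changed: Replaces A's five sequential early-return if/any keyword-group blocks with a flat keyword-to-rank map and a single min-reduction: every keyword occurrence is evaluated, the minimum rank of any keyword present in the text indexes the label table.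
import Mathlib
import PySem

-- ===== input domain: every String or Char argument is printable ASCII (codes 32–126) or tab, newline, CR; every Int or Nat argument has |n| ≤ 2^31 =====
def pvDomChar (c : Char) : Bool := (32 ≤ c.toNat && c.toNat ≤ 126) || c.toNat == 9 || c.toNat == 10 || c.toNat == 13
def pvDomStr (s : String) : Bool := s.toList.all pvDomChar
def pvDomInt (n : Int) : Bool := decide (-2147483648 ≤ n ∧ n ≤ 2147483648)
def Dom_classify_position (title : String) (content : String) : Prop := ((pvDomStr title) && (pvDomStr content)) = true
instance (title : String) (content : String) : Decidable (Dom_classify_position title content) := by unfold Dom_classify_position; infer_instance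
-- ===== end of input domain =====

-- B replaces A's five early-return keyword-group blocks with a flat keyword→rank map and a min-reduction (objective: alternative; same return values).

-- ===== PORT A =====
def classify_position (title : String) (content : String) : String :=
  let title_content := PySem.Str.lower (title ++ " " ++ content)
  if ["phd", "doctoral", "doctorate", "thesis"].any (fun x => PySem.Str.isIn x title_content) then
    "PhD Position"
  else if ["postdoc", "post-doctoral", "postdoctoral"].any (fun x => PySem.Str.isIn x title_content) then
    "Postdoctoral Position"
  else if ["professor", "lecturer", "faculty", "teaching"].any (fun x => PySem.Str.isIn x title_content) then
    "Academic Position"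
  else if ["researcher", "scientist", "research fellow"].any (fun x => PySem.Str.isIn x title_content) then
    "Research Position"
  else if ["engineer", "technician", "specialist"].any (fun x => PySem.Str.isIn x title_content) then
    "Technical Position"
  else
    "Other Position"

-- ===== PORT B =====
def pvKeywordRank : List (String × Nat) :=
  [("phd", 0), ("doctoral", 0), ("doctorate", 0), ("thesis", 0),
   ("postdoc", 1), ("post-doctoral", 1), ("postdoctoral", 1),
   ("professor", 2), ("lecturer", 2), ("faculty", 2), ("teaching", 2),
   ("researcher", 3), ("scientist", 3), ("research fellow", 3),
   ("engineer", 4), ("technician", 4), ("specialist", 4)]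

def pvLabels : List String :=
  ["PhD Position", "Postdoctoral Position", "Academic Position",
   "Research Position", "Technical Position", "Other Position"]

def classify_position_alt (title : String) (content : String) : String :=
  let text := PySem.Str.lower (title ++ " " ++ content)
  let best : Nat := pvKeywordRank.foldl
    (fun best p => if decide (p.2 < best) && PySem.Str.isIn p.1 text then p.2 else best) 5
  -- LABELS[best]: best ≤ 5 always, so the IndexError default "" is never reached
  (PySem.List.pyGet? pvLabels (best : Int)).getD ""

-- ===== PRECONDITION & SPEC =====
def Spec_classify_position (title : String) (content : String) (out : String) : Prop := out = classify_position_alt title content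
instance (title : String) (content : String) (out : String) : Decidable (Spec_classify_position title content out) := by unfold Spec_classify_position; infer_instance

-- ===== CLAIM (what is proved, stated in full; the proofs are below) =====
def Claim_equal_classify_position : Prop := ∀ (title : String) (content : String), Dom_classify_position title content → Spec_classify_position title content (classify_position title content)

-- ===== LEMMAS AND PROOFS =====

-- The fold's accumulator never changes once no remaining rank is below it.
lemma pvFoldConst (t : String) (acc : Nat) (l : List (String × Nat))
    (h : ∀ p ∈ l, ¬ p.2 < acc) :
    List.foldl (fun best p => if decide (p.2 < best) && PySem.Str.isIn p.1 t then p.2 else best) acc l = acc := by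
  induction l with
  | nil => rfl
  | cons a l ih =>
    rw [List.foldl_cons, if_neg]
    · exact ih (fun p hp => h p (List.mem_cons_of_mem _ hp))
    · simp [h a (List.mem_cons_self ..)]

-- ===== VERDICT (by name: the statement is the Claim_ definition above) =====
set_option maxHeartbeats 1000000 in
theorem classify_position_spec : Claim_equal_classify_position := by
  intro title content _
  unfold Spec_classify_position classify_position classify_position_alt pvKeywordRank pvLabels
  simp only [List.any_cons, List.any_nil, Bool.or_false]
  cases h1 : PySem.Str.isIn "phd" (PySem.Str.lower (title ++ " " ++ content)) with
  | true =>
    rw [List.foldl_cons]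
    simp only [h1, Bool.and_true, Bool.true_or]
    rw [if_pos trivial, if_pos (by decide), pvFoldConst]
    exacts [rfl, by decide]
  | false =>
    rw [List.foldl_cons]
    simp only [h1, Bool.and_false, Bool.false_eq_true, if_false, Bool.false_or]
    cases h2 : PySem.Str.isIn "doctoral" (PySem.Str.lower (title ++ " " ++ content)) with
    | true =>
      rw [List.foldl_cons]
      simp only [h2, Bool.and_true, Bool.true_or]
      rw [if_pos trivial, if_pos (by decide), pvFoldConst]
      exacts [rfl, by decide]
    | false =>
      rw [List.foldl_cons]
      simp only [h2, Bool.and_false, Bool.false_eq_true, if_false, Bool.false_or]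
      cases h3 : PySem.Str.isIn "doctorate" (PySem.Str.lower (title ++ " " ++ content)) with
      | true =>
        rw [List.foldl_cons]
        simp only [h3, Bool.and_true, Bool.true_or]
        rw [if_pos trivial, if_pos (by decide), pvFoldConst]
        exacts [rfl, by decide]
      | false =>
        rw [List.foldl_cons]
        simp only [h3, Bool.and_false, Bool.false_eq_true, if_false, Bool.false_or]
        cases h4 : PySem.Str.isIn "thesis" (PySem.Str.lower (title ++ " " ++ content)) with
        | true =>
          rw [List.foldl_cons]
          simp only [h4, Bool.and_true]
          rw [if_pos trivial, if_pos (by decide), pvFoldConst]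
          exacts [rfl, by decide]
        | false =>
          rw [List.foldl_cons]
          simp only [h4, Bool.and_false, Bool.false_eq_true, if_false]
          cases h5 : PySem.Str.isIn "postdoc" (PySem.Str.lower (title ++ " " ++ content)) with
          | true =>
            rw [List.foldl_cons]
            simp only [h5, Bool.and_true, Bool.true_or]
            rw [if_pos trivial, if_pos (by decide), pvFoldConst]
            exacts [rfl, by decide]
          | false =>
            rw [List.foldl_cons]
            simp only [h5, Bool.and_false, Bool.false_eq_true, if_false, Bool.false_or]
            cases h6 : PySem.Str.isIn "post-doctoral" (PySem.Str.lower (title ++ " " ++ content)) with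
            | true =>
              rw [List.foldl_cons]
              simp only [h6, Bool.and_true, Bool.true_or]
              rw [if_pos trivial, if_pos (by decide), pvFoldConst]
              exacts [rfl, by decide]
            | false =>
              rw [List.foldl_cons]
              simp only [h6, Bool.and_false, Bool.false_eq_true, if_false, Bool.false_or]
              cases h7 : PySem.Str.isIn "postdoctoral" (PySem.Str.lower (title ++ " " ++ content)) with
              | true =>
                rw [List.foldl_cons]
                simp only [h7, Bool.and_true]
                rw [if_pos trivial, if_pos (by decide), pvFoldConst]
                exacts [rfl, by decide]
              | false =>
                rw [List.foldl_cons]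
                simp only [h7, Bool.and_false, Bool.false_eq_true, if_false]
                cases h8 : PySem.Str.isIn "professor" (PySem.Str.lower (title ++ " " ++ content)) with
                | true =>
                  rw [List.foldl_cons]
                  simp only [h8, Bool.and_true, Bool.true_or]
                  rw [if_pos trivial, if_pos (by decide), pvFoldConst]
                  exacts [rfl, by decide]
                | false =>
                  rw [List.foldl_cons]
                  simp only [h8, Bool.and_false, Bool.false_eq_true, if_false, Bool.false_or]
                  cases h9 : PySem.Str.isIn "lecturer" (PySem.Str.lower (title ++ " " ++ content)) with
                  | true =>
                    rw [List.foldl_cons]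
                    simp only [h9, Bool.and_true, Bool.true_or]
                    rw [if_pos trivial, if_pos (by decide), pvFoldConst]
                    exacts [rfl, by decide]
                  | false =>
                    rw [List.foldl_cons]
                    simp only [h9, Bool.and_false, Bool.false_eq_true, if_false, Bool.false_or]
                    cases h10 : PySem.Str.isIn "faculty" (PySem.Str.lower (title ++ " " ++ content)) with
                    | true =>
                      rw [List.foldl_cons]
                      simp only [h10, Bool.and_true, Bool.true_or]
                      rw [if_pos trivial, if_pos (by decide), pvFoldConst]
                      exacts [rfl, by decide]
                    | false =>
                      rw [List.foldl_cons]
                      simp only [h10, Bool.and_false, Bool.false_eq_true, if_false, Bool.false_or]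
                      cases h11 : PySem.Str.isIn "teaching" (PySem.Str.lower (title ++ " " ++ content)) with
                      | true =>
                        rw [List.foldl_cons]
                        simp only [h11, Bool.and_true]
                        rw [if_pos trivial, if_pos (by decide), pvFoldConst]
                        exacts [rfl, by decide]
                      | false =>
                        rw [List.foldl_cons]
                        simp only [h11, Bool.and_false, Bool.false_eq_true, if_false]
                        cases h12 : PySem.Str.isIn "researcher" (PySem.Str.lower (title ++ " " ++ content)) with
                        | true =>
                          rw [List.foldl_cons]
                          simp only [h12, Bool.and_true, Bool.true_or]
                          rw [if_pos trivial, if_pos (by decide), pvFoldConst]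
                          exacts [rfl, by decide]
                        | false =>
                          rw [List.foldl_cons]
                          simp only [h12, Bool.and_false, Bool.false_eq_true, if_false, Bool.false_or]
                          cases h13 : PySem.Str.isIn "scientist" (PySem.Str.lower (title ++ " " ++ content)) with
                          | true =>
                            rw [List.foldl_cons]
                            simp only [h13, Bool.and_true, Bool.true_or]
                            rw [if_pos trivial, if_pos (by decide), pvFoldConst]
                            exacts [rfl, by decide]
                          | false =>
                            rw [List.foldl_cons]
                            simp only [h13, Bool.and_false, Bool.false_eq_true, if_false, Bool.false_or]
                            cases h14 : PySem.Str.isIn "research fellow" (PySem.Str.lower (title ++ " " ++ content)) with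
                            | true =>
                              rw [List.foldl_cons]
                              simp only [h14, Bool.and_true]
                              rw [if_pos trivial, if_pos (by decide), pvFoldConst]
                              exacts [rfl, by decide]
                            | false =>
                              rw [List.foldl_cons]
                              simp only [h14, Bool.and_false, Bool.false_eq_true, if_false]
                              cases h15 : PySem.Str.isIn "engineer" (PySem.Str.lower (title ++ " " ++ content)) with
                              | true =>
                                rw [List.foldl_cons]
                                simp only [h15, Bool.and_true, Bool.true_or]
                                rw [if_pos trivial, if_pos (by decide), pvFoldConst]
                                exacts [rfl, by decide]
                              | false =>
                                rw [List.foldl_cons]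
                                simp only [h15, Bool.and_false, Bool.false_eq_true, if_false, Bool.false_or]
                                cases h16 : PySem.Str.isIn "technician" (PySem.Str.lower (title ++ " " ++ content)) with
                                | true =>
                                  rw [List.foldl_cons]
                                  simp only [h16, Bool.and_true, Bool.true_or]
                                  rw [if_pos trivial, if_pos (by decide), pvFoldConst]
                                  exacts [rfl, by decide]
                                | false =>
                                  rw [List.foldl_cons]
                                  simp only [h16, Bool.and_false, Bool.false_eq_true, if_false, Bool.false_or]
                                  cases h17 : PySem.Str.isIn "specialist" (PySem.Str.lower (title ++ " " ++ content)) with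
                                  | true =>
                                    rw [List.foldl_cons]
                                    simp only [h17, Bool.and_true]
                                    rw [if_pos trivial, if_pos (by decide), pvFoldConst]
                                    exacts [rfl, by decide]
                                  | false =>
                                    rw [List.foldl_cons]
                                    simp only [h17, Bool.and_false, Bool.false_eq_true, if_false]
                                    rfl
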